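-- pv_equiv track=rewrite | github.com/kiIIer/kpi-6 | mat/lab/lab-1-28.03.2024/random-generator/main.py | calculate_lfsr_cycle_length
-- ===== SOURCE A (Python) =====
-- def calculate_lfsr_cycle_length(sequence):
--     for cycle_length in range(1, len(sequence)):
--         is_repeating = True
--         for i in range(len(sequence) - cycle_length):
--             if sequence[i] != sequence[i + cycle_length]:
--                 is_repeating = False
--                 break
--
--         if is_repeating:
--             return cycle_length
--
--     return len(sequence)
-- ===== SOURCE B (Python) =====
-- def calculate_lfsr_cycle_length(sequence):
--     n = len(sequence)
--     if n == 0: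
--         return 0
--     pi = [0] * n
--     k = 0
--     for i in range(1, n):
--         while k > 0 and sequence[i] != sequence[k]:
--             k = pi[k - 1]
--         if sequence[i] == sequence[k]:
--             k += 1
--         pi[i] = k
--     return n - pi[n - 1]
-- ===== Notes on version B (the rewrite author's own statement) =====
-- stated objective: faster
-- what changed: B replaces A's quadratic try-every-shift scan with the KMP prefix function computed in one linear pass: the smallest cycle length equals n minus the longest proper border pi[n-1].
import Mathlib
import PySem

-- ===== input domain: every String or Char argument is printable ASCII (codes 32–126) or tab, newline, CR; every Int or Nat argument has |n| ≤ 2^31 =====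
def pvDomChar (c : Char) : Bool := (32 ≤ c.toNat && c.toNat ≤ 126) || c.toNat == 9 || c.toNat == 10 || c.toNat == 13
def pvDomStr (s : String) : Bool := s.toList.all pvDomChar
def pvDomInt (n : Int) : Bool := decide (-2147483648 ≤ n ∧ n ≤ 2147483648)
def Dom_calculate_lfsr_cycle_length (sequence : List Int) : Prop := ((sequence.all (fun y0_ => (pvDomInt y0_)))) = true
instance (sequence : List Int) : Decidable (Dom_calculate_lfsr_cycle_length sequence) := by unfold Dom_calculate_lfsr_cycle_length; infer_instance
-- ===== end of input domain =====

-- B replaces A's quadratic period scan by the KMP prefix function: the smallest cycle length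
-- equals n minus the longest proper border of the sequence, computed in one linear pass.

-- ===== PORT A =====
-- inner loop 'for i in range(len(sequence) - cycle_length): if sequence[i] != sequence[i+cycle_length]: break'
-- (indices are always in range in the Python, so getD is exact here)
def pvAInner : List Nat → List Int → Nat → Bool
  | [], _, _ => true
  | i :: rest, s, p => if s.getD i 0 ≠ s.getD (i + p) 0 then false else pvAInner rest s p

-- outer loop 'for cycle_length in range(1, len(sequence)):', early return on is_repeating
def pvAOuter : List Nat → List Int → Int
  | [], s => (s.length : Int)
  | p :: rest, s =>
      if pvAInner (List.range (s.length - p)) s p then (p : Int) else pvAOuter rest s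

def calculate_lfsr_cycle_length (sequence : List Int) : Int :=
  pvAOuter (List.range' 1 (sequence.length - 1)) sequence

-- ===== PORT B =====
-- 'while k > 0 and sequence[i] != sequence[k]: k = pi[k-1]'.  The fuel (initial k) only makes the
-- recursion structural: each pass strictly decreases k, so fuel = k is never exhausted.
def pvKmpWhile (s : List Int) (pi : List Nat) : Nat → Nat → Nat → Nat
  | 0, k, _ => k
  | fuel + 1, k, i =>
      if 0 < k ∧ s.getD i 0 ≠ s.getD k 0 then pvKmpWhile s pi fuel (pi.getD (k - 1) 0) i else k

-- one iteration of 'for i in range(1, n)': the while loop, the match test, 'pi[i] = k'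
def pvKmpStep (s : List Int) (st : List Nat × Nat) (i : Nat) : List Nat × Nat :=
  let k1 := pvKmpWhile s st.1 st.2 st.2 i
  let k2 := if s.getD i 0 = s.getD k1 0 then k1 + 1 else k1
  (st.1.set i k2, k2)

-- 'pi = [0] * n; k = 0; for i in range(1, n): ...; return n - pi[n-1]'
def calculate_lfsr_cycle_length_alt (sequence : List Int) : Int :=
  if sequence.length = 0 then 0
  else
    (sequence.length : Int) -
      (((List.range' 1 (sequence.length - 1)).foldl (pvKmpStep sequence)
        (List.replicate sequence.length 0, 0)).1.getD (sequence.length - 1) 0 : Int)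

-- ===== PRECONDITION & SPEC =====
def Spec_calculate_lfsr_cycle_length (sequence : List Int) (out : Int) : Prop := out = calculate_lfsr_cycle_length_alt sequence
instance (sequence : List Int) (out : Int) : Decidable (Spec_calculate_lfsr_cycle_length sequence out) := by unfold Spec_calculate_lfsr_cycle_length; infer_instance

-- ===== CLAIM (what is proved, stated in full; the proofs are below) =====
def Claim_equal_calculate_lfsr_cycle_length : Prop := ∀ (sequence : List Int), Dom_calculate_lfsr_cycle_length sequence → Spec_calculate_lfsr_cycle_length sequence (calculate_lfsr_cycle_length sequence)

-- ===== LEMMAS AND PROOFS =====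

-- 'k is a border of t': the length-k prefix of t is also its length-k suffix
abbrev Brd (t : List Int) (k : Nat) : Prop := k ≤ t.length ∧ t.take k = t.drop (t.length - k)

-- longest proper border length
def lb (t : List Int) : Nat := Nat.findGreatest (fun k => Brd t k) (t.length - 1)

theorem brd_zero (t : List Int) : Brd t 0 := by
  refine ⟨Nat.zero_le _, ?_⟩
  simp

theorem brd_suffix {t : List Int} {k : Nat} (h : Brd t k) : t.take k <:+ t := by
  rw [List.suffix_iff_eq_drop, List.length_take, Nat.min_eq_left h.1]
  exact h.2

theorem brd_of_take_suffix {t : List Int} {k : Nat} (hk : k ≤ t.length)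
    (h : t.take k <:+ t) : Brd t k := by
  rw [List.suffix_iff_eq_drop, List.length_take, Nat.min_eq_left hk] at h
  exact ⟨hk, h⟩

theorem brd_lb (t : List Int) : Brd t (lb t) :=
  Nat.findGreatest_spec (Nat.zero_le _) (brd_zero t)

theorem lb_le (t : List Int) : lb t ≤ t.length - 1 :=
  Nat.findGreatest_le _

theorem lb_greatest {t : List Int} {k : Nat} (h : Brd t k) (hk : k ≤ t.length - 1) :
    k ≤ lb t :=
  Nat.le_findGreatest hk h

-- a border of a border is a border (downward transfer onto the prefix take j t)
theorem brd_take_of_brd {t : List Int} {j k : Nat} (hkj : k ≤ j) (hj : Brd t j)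
    (hk : Brd t k) : Brd (t.take j) k := by
  have hlen : (t.take j).length = j := by simp [Nat.min_eq_left hj.1]
  apply brd_of_take_suffix (by omega)
  have heq : (t.take j).take k = t.take k := by rw [List.take_take, Nat.min_eq_left hkj]
  rw [heq]
  exact List.suffix_of_suffix_length_le (brd_suffix hk) (brd_suffix hj)
    (by simp [Nat.min_eq_left hk.1, Nat.min_eq_left hj.1, hkj])

-- and back up: a border of take j t is a border of t when j is a border of t
theorem brd_of_brd_take {t : List Int} {j k : Nat} (hkj : k ≤ j) (hj : Brd t j)
    (hk : Brd (t.take j) k) : Brd t k := by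
  apply brd_of_take_suffix (le_trans hkj hj.1)
  have heq : (t.take j).take k = t.take k := by rw [List.take_take, Nat.min_eq_left hkj]
  exact List.IsSuffix.trans (heq ▸ brd_suffix hk) (brd_suffix hj)

theorem getD_take_eq (s : List Int) (i k : Nat) (h : k < i) :
    (s.take i).getD k 0 = s.getD k 0 := by
  by_cases hk : k < s.length
  · rw [List.getD_eq_getElem _ _ (by simp; omega), List.getD_eq_getElem _ _ hk,
      List.getElem_take]
  · rw [List.getD_eq_default _ _ (by simp; omega), List.getD_eq_default _ _ (by omega)]

theorem take_succ_getD (s : List Int) (i : Nat) (h : i < s.length) :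
    s.take (i + 1) = s.take i ++ [s.getD i 0] := by
  rw [List.take_add_one, List.getElem?_eq_getElem h, List.getD_eq_getElem _ _ h]
  rfl

-- extension: k+1 is a border of t ++ [c] iff k is a border of t and t[k] = c
theorem brd_append_iff (t : List Int) (c : Int) (k : Nat) (hk : k < t.length) :
    Brd (t ++ [c]) (k + 1) ↔ Brd t k ∧ t.getD k 0 = c := by
  have hlen : (t ++ [c]).length = t.length + 1 := by simp
  have htake : (t ++ [c]).take (k + 1) = t.take k ++ [t.getD k 0] := by
    rw [List.take_append_of_le_length (by omega), take_succ_getD t k hk]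
  have hdropn : (t ++ [c]).length - (k + 1) = t.length - k := by omega
  have hdrop : (t ++ [c]).drop (t.length - k) = t.drop (t.length - k) ++ [c] :=
    List.drop_append_of_le_length (by omega)
  constructor
  · rintro ⟨-, h⟩
    rw [htake, hdropn, hdrop] at h
    have := List.append_inj h (by simp [Nat.min_eq_left (le_of_lt hk)]; omega)
    refine ⟨⟨le_of_lt hk, this.1⟩, ?_⟩
    simpa using this.2
  · rintro ⟨⟨-, hb⟩, hc⟩
    refine ⟨by omega, ?_⟩
    rw [htake, hdropn, hdrop, hb, hc]

-- the while loop: starting from a border k of s.take i that dominates (+1) every proper border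
-- of s.take (i+1), it reaches a border k1 with the same property and k1 = 0 or s[i] = s[k1]
theorem pvKmpWhile_spec (s : List Int) (pi : List Nat) (i : Nat) (hi : i < s.length)
    (Hpi : ∀ j, j < i → pi.getD j 0 = lb (s.take (j + 1))) :
    ∀ fuel k, k ≤ fuel → k < i → Brd (s.take i) k →
      (∀ b, b ≤ i → Brd (s.take (i + 1)) b → b ≤ k + 1) →
      (Brd (s.take i) (pvKmpWhile s pi fuel k i) ∧ pvKmpWhile s pi fuel k i < i ∧
        (∀ b, b ≤ i → Brd (s.take (i + 1)) b → b ≤ pvKmpWhile s pi fuel k i + 1) ∧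
        (pvKmpWhile s pi fuel k i = 0 ∨ s.getD i 0 = s.getD (pvKmpWhile s pi fuel k i) 0)) := by
  intro fuel
  induction fuel with
  | zero =>
      intro k hk hki hbrd hall
      interval_cases k
      exact ⟨hbrd, hki, hall, Or.inl rfl⟩
  | succ fuel ih =>
      intro k hk hki hbrd hall
      rw [pvKmpWhile]
      by_cases hcond : 0 < k ∧ s.getD i 0 ≠ s.getD k 0
      · rw [if_pos hcond]
        set k' := pi.getD (k - 1) 0 with hk'
        have hklen : (s.take i).length = i := by simp [Nat.min_eq_left (le_of_lt hi)]
        have htk : (s.take i).take k = s.take k := by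
          rw [List.take_take, Nat.min_eq_left (le_of_lt hki)]
        have hk'lb : k' = lb (s.take k) := by
          rw [hk', Hpi (k - 1) (by omega)]
          have hkk : k - 1 + 1 = k := by omega
          rw [hkk]
        have hk'k : k' < k := by
          have := lb_le (s.take k)
          have hkl : (s.take k).length = k := by
            simp [Nat.min_eq_left (le_of_lt (lt_trans hki hi))]
          omega
        have hbrd' : Brd (s.take i) k' := by
          apply brd_of_brd_take (le_of_lt hk'k) hbrd
          rw [htk, hk'lb]
          exact brd_lb _
        have hall' : ∀ b, b ≤ i → Brd (s.take (i + 1)) b → b ≤ k' + 1 := by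
          intro b hbi hb
          rcases b with _ | b0
          · omega
          · have hb0i : b0 < i := by omega
            have hsplit : s.take (i + 1) = s.take i ++ [s.getD i 0] := take_succ_getD s i hi
            rw [hsplit] at hb
            have hext := (brd_append_iff (s.take i) (s.getD i 0) b0 (by omega)).mp hb
            have hb0k : b0 ≤ k := by
              have := hall (b0 + 1) hbi (hsplit ▸ hb)
              omega
            have hb0ne : b0 ≠ k := by
              intro hbe
              apply hcond.2
              rw [← hext.2, hbe, getD_take_eq s i k hki]
            have hb0brd : Brd (s.take k) b0 := by
              rw [← htk]
              exact brd_take_of_brd (by omega) hbrd hext.1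
            have : b0 ≤ lb (s.take k) := by
              apply lb_greatest hb0brd
              have hkl : (s.take k).length = k := by
                simp [Nat.min_eq_left (le_of_lt (lt_trans hki hi))]
              omega
            omega
        exact ih k' (by omega) (lt_trans hk'k hki) hbrd' hall'
      · rw [if_neg hcond]
        refine ⟨hbrd, hki, hall, ?_⟩
        by_cases h0 : k = 0
        · exact Or.inl h0
        · right
          by_contra hne
          exact hcond ⟨by omega, hne⟩

-- one kmp step preserves the invariant: pi correct up to i and k = lb (s.take (i+1))
theorem pvKmpStep_inv (s : List Int) (i : Nat) (st : List Nat × Nat)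
    (hi1 : 1 ≤ i) (hi : i < s.length)
    (hlen : st.1.length = s.length)
    (hk : st.2 = lb (s.take i))
    (Hpi : ∀ j, j < i → st.1.getD j 0 = lb (s.take (j + 1))) :
    (pvKmpStep s st i).1.length = s.length ∧
      (pvKmpStep s st i).2 = lb (s.take (i + 1)) ∧
      (∀ j, j < i + 1 → (pvKmpStep s st i).1.getD j 0 = lb (s.take (j + 1))) := by
  have hklen : (s.take i).length = i := by simp [Nat.min_eq_left (le_of_lt hi)]
  have hki : st.2 < i := by
    have := lb_le (s.take i)
    omega
  have hsplit : s.take (i + 1) = s.take i ++ [s.getD i 0] := take_succ_getD s i hi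
  have ht1len : (s.take (i + 1)).length = i + 1 := by
    simp [Nat.min_eq_left hi]
  have hall : ∀ b, b ≤ i → Brd (s.take (i + 1)) b → b ≤ st.2 + 1 := by
    intro b hbi hb
    rcases b with _ | b0
    · omega
    · rw [hsplit] at hb
      have hext := (brd_append_iff (s.take i) (s.getD i 0) b0 (by omega)).mp hb
      have : b0 ≤ lb (s.take i) := lb_greatest hext.1 (by omega)
      omega
  obtain ⟨hb1, hlt1, hall1, hm1⟩ :=
    pvKmpWhile_spec s st.1 i hi Hpi st.2 st.2 le_rfl hki (hk ▸ brd_lb (s.take i)) hall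
  set k1 := pvKmpWhile s st.1 st.2 st.2 i with hk1def
  have hlb1 : (if s.getD i 0 = s.getD k1 0 then k1 + 1 else k1) = lb (s.take (i + 1)) := by
    by_cases hmatch : s.getD i 0 = s.getD k1 0
    · rw [if_pos hmatch]
      have hbnew : Brd (s.take (i + 1)) (k1 + 1) := by
        rw [hsplit]
        apply (brd_append_iff (s.take i) (s.getD i 0) k1 (by omega)).mpr
        exact ⟨hb1, by rw [getD_take_eq s i k1 hlt1, ← hmatch]⟩
      have hge : k1 + 1 ≤ lb (s.take (i + 1)) := lb_greatest hbnew (by omega)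
      have hle : lb (s.take (i + 1)) ≤ k1 + 1 := by
        apply hall1 _ (by have := lb_le (s.take (i + 1)); omega)
        exact brd_lb _
      omega
    · rw [if_neg hmatch]
      have hk10 : k1 = 0 := by
        rcases hm1 with h | h
        · exact h
        · exact absurd h hmatch
      have hle : lb (s.take (i + 1)) ≤ 1 := by
        have := hall1 (lb (s.take (i + 1))) (by have := lb_le (s.take (i + 1)); omega)
          (brd_lb _)
        omega
      have hne1 : lb (s.take (i + 1)) ≠ 1 := by
        intro h1
        have hb := brd_lb (s.take (i + 1))
        rw [h1, hsplit] at hb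
        have hext := (brd_append_iff (s.take i) (s.getD i 0) 0 (by omega)).mp hb
        apply hmatch
        rw [hk10, ← getD_take_eq s i 0 (by omega), hext.2]
      omega
  refine ⟨by simp [pvKmpStep, hlen], by simpa [pvKmpStep] using hlb1, ?_⟩
  intro j hj
  by_cases hje : j = i
  · rw [hje]
    have : (pvKmpStep s st i).1.getD i 0 = (pvKmpStep s st i).2 := by
      simp only [pvKmpStep]
      rw [List.getD_eq_getElem _ _ (by simp [hlen]; omega), List.getElem_set_self]
    rw [this]
    simpa [pvKmpStep] using hlb1
  · have hji : j < i := by omega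
    have : (pvKmpStep s st i).1.getD j 0 = st.1.getD j 0 := by
      simp only [pvKmpStep]
      by_cases hjl : j < st.1.length
      · rw [List.getD_eq_getElem _ _ (by simpa using hjl), List.getD_eq_getElem _ _ hjl,
          List.getElem_set_ne (by omega)]
      · rw [List.getD_eq_default _ _ (by simpa using hjl), List.getD_eq_default _ _ (by omega)]
    rw [this]
    exact Hpi j hji

-- the fold over i = 1 .. m keeps the invariant
theorem kmpFold_inv (s : List Int) :
    ∀ m, m ≤ s.length - 1 →
      (((List.range' 1 m).foldl (pvKmpStep s) (List.replicate s.length 0, 0)).1.length = s.length ∧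
        ((List.range' 1 m).foldl (pvKmpStep s) (List.replicate s.length 0, 0)).2 = lb (s.take (m + 1)) ∧
        (∀ j, j < m + 1 →
          ((List.range' 1 m).foldl (pvKmpStep s) (List.replicate s.length 0, 0)).1.getD j 0 =
            lb (s.take (j + 1)))) := by
  intro m
  induction m with
  | zero =>
      intro _
      refine ⟨by simp, ?_, ?_⟩
      · simp [lb]
      · intro j hj
        interval_cases j
        simp [lb, List.getD]
  | succ m ih =>
      intro hm
      have hrange : List.range' 1 (m + 1) = List.range' 1 m ++ [1 + m] := by
        rw [← List.range'_append]
        simp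
      rw [hrange, List.foldl_append]
      obtain ⟨ih1, ih2, ih3⟩ := ih (by omega)
      have h1m : 1 + m = m + 1 := by omega
      rw [List.foldl_cons, List.foldl_nil, h1m]
      have := pvKmpStep_inv s (m + 1)
        ((List.range' 1 m).foldl (pvKmpStep s) (List.replicate s.length 0, 0))
        (by omega) (by omega) ih1 (by simpa using ih2)
        (by intro j hj; exact ih3 j (by omega))
      exact this

-- the inner element-by-element loop succeeds iff every checked pair of positions agrees
theorem pvAInner_iff (L : List Nat) (s : List Int) (p : Nat) :
    pvAInner L s p = true ↔ ∀ i ∈ L, s.getD i 0 = s.getD (i + p) 0 := by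
  induction L with
  | nil => simp [pvAInner]
  | cons i rest ih =>
      simp only [pvAInner, List.mem_cons]
      by_cases h : s.getD i 0 = s.getD (i + p) 0
      · rw [if_neg (by simpa using h)]
        constructor
        · intro ht j hj
          rcases hj with rfl | hj
          · exact h
          · exact ih.mp ht j hj
        · intro hall
          exact ih.mpr (fun j hj => hall j (Or.inr hj))
      · rw [if_pos h]
        simp only [Bool.false_eq_true, false_iff, not_forall]
        exact ⟨i, Or.inl rfl, h⟩

-- slice equality 'take (n-p) = drop p' iff A's elementwise condition for period p
theorem border_iff (s : List Int) (p : Nat) (hp : p ≤ s.length) :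
    (s.take (s.length - p) = s.drop p) ↔
      ∀ i ∈ List.range (s.length - p), s.getD i 0 = s.getD (i + p) 0 := by
  constructor
  · intro h i hi
    rw [List.mem_range] at hi
    have h1 : i < s.length := by omega
    have h2 : i + p < s.length := by omega
    rw [List.getD_eq_getElem s 0 h1, List.getD_eq_getElem s 0 h2]
    have hlt : i < (s.take (s.length - p)).length := by simp; omega
    have := List.getElem_of_eq h hlt
    simpa [List.getElem_take, List.getElem_drop, Nat.add_comm p i] using this
  · intro h
    apply List.ext_getElem
    · simp only [List.length_take, List.length_drop]; omega
    · intro i h1 h2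
      have hi : i < s.length - p := by simpa using h1
      have hd := h i (List.mem_range.mpr hi)
      have ha : i < s.length := by omega
      have hb : i + p < s.length := by omega
      rw [List.getD_eq_getElem s 0 ha, List.getD_eq_getElem s 0 hb] at hd
      simpa [List.getElem_take, List.getElem_drop, Nat.add_comm p i] using hd

-- A's success condition at period p is 'n - p is a border'
theorem aCond_iff_brd (s : List Int) (p : Nat) (hp1 : 1 ≤ p) (hp2 : p ≤ s.length) :
    (pvAInner (List.range (s.length - p)) s p = true) ↔ Brd s (s.length - p) := by
  rw [pvAInner_iff, ← border_iff s p hp2]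
  have : s.length - (s.length - p) = p := by omega
  constructor
  · intro h
    exact ⟨by omega, by rw [this]; exact h⟩
  · intro h
    have hb := h.2
    rwa [this] at hb

-- if no candidate succeeds, A falls through to n
theorem pvAOuter_none (s : List Int) :
    ∀ ps : List Nat, (∀ p ∈ ps, ¬ (pvAInner (List.range (s.length - p)) s p = true)) →
      pvAOuter ps s = (s.length : Int) := by
  intro ps
  induction ps with
  | nil => intro _; rfl
  | cons p rest ih =>
      intro h
      rw [pvAOuter, if_neg (by simpa using h p (by simp))]
      exact ih (fun q hq => h q (by simp [hq]))

-- A returns the first succeeding candidate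
theorem pvAOuter_first (s : List Int) (p : Nat) (l2 : List Nat) :
    ∀ l1 : List Nat, (∀ q ∈ l1, ¬ (pvAInner (List.range (s.length - q)) s q = true)) →
      pvAInner (List.range (s.length - p)) s p = true →
      pvAOuter (l1 ++ p :: l2) s = (p : Int) := by
  intro l1
  induction l1 with
  | nil =>
      intro _ hp
      rw [List.nil_append, pvAOuter, if_pos hp]
  | cons q rest ih =>
      intro h hp
      rw [List.cons_append, pvAOuter, if_neg (by simpa using h q (by simp))]
      exact ih (fun r hr => h r (by simp [hr])) hp

-- A computes n - (longest proper border)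
theorem A_eq_lb (s : List Int) :
    calculate_lfsr_cycle_length s = (s.length : Int) - (lb s : Int) := by
  set n := s.length with hn
  set k := lb s with hkdef
  have hkle : k ≤ n - 1 := lb_le s
  unfold calculate_lfsr_cycle_length
  by_cases hk0 : k = 0
  · rw [hk0]
    have : pvAOuter (List.range' 1 (s.length - 1)) s = (s.length : Int) := by
      apply pvAOuter_none
      intro p hp
      rw [List.mem_range'_1] at hp
      intro hcond
      have hb := (aCond_iff_brd s p (by omega) (by omega)).mp hcond
      have : n - p ≤ k := lb_greatest hb (by omega)
      omega
    rw [this]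
    omega
  · have hp1 : 1 ≤ n - k := by omega
    have hp2 : n - k ≤ n - 1 := by omega
    have hsplit : List.range' 1 (n - 1) =
        List.range' 1 (n - k - 1) ++ (n - k) :: List.range' (n - k + 1) (n - 1 - (n - k)) := by
      have h0 : List.range' 1 (n - k - 1) ++ List.range' (1 + 1 * (n - k - 1)) (n - 1 - (n - k) + 1) =
          List.range' 1 ((n - k - 1) + (n - 1 - (n - k) + 1)) := List.range'_append
      have h1 : 1 + 1 * (n - k - 1) = n - k := by omega
      have h2 : (n - k - 1) + (n - 1 - (n - k) + 1) = n - 1 := by omega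
      rw [h1, h2] at h0
      rw [← h0, List.range'_succ]
    rw [hsplit]
    have hfirst := pvAOuter_first s (n - k)
      (List.range' (n - k + 1) (n - 1 - (n - k))) (List.range' 1 (n - k - 1))
      (by
        intro q hq
        rw [List.mem_range'_1] at hq
        intro hcond
        have hb := (aCond_iff_brd s q (by omega) (by omega)).mp hcond
        have : n - q ≤ k := lb_greatest hb (by omega)
        omega)
      (by
        apply (aCond_iff_brd s (n - k) (by omega) (by omega)).mpr
        have : n - (n - k) = k := by omega
        rw [this]
        exact brd_lb s)
    rw [hfirst]
    omega

-- B computes n - (longest proper border) as well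
theorem B_eq_lb (s : List Int) (hs : s.length ≠ 0) :
    calculate_lfsr_cycle_length_alt s = (s.length : Int) - (lb s : Int) := by
  unfold calculate_lfsr_cycle_length_alt
  rw [if_neg hs]
  obtain ⟨h1, h2, h3⟩ := kmpFold_inv s (s.length - 1) le_rfl
  have := h3 (s.length - 1) (by omega)
  rw [this]
  have : s.length - 1 + 1 = s.length := by omega
  rw [this, List.take_length]

-- ===== VERDICT (by name: the statement is the Claim_ definition above) =====
theorem calculate_lfsr_cycle_length_spec : Claim_equal_calculate_lfsr_cycle_length := by
  intro s _
  unfold Spec_calculate_lfsr_cycle_length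
  by_cases hs : s.length = 0
  · have : s = [] := List.length_eq_zero_iff.mp hs
    subst this
    rfl
  · rw [A_eq_lb s, B_eq_lb s hs]
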